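-- pv_equiv track=rewrite | github.com/swl10/pyslet | pyslet/rfc2396.py | _relativize_segments
-- ===== SOURCE A (Python) =====
-- def _relativize_segments(path_segments, base_segments):
--     result = []
--     pos = 0
--     while pos < len(base_segments):
--         if result:
--             result = ['..'] + result
--         else:
--             if (pos >= len(path_segments) or
--                     base_segments[pos] != path_segments[pos]):
--                 result = result + path_segments[pos:]
--         pos = pos + 1
--     if not result and len(path_segments) > len(base_segments):
--         # full match but path_segments is longer
--         return path_segments[len(base_segments) - 1:]
--     elif result == ['']:
--         return ['.'] + result
--     else:
--         return result
-- ===== SOURCE B (Python) =====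
-- def _relativize_segments(path_segments, base_segments):
--     n = len(base_segments)
--     # single scan: length of the common prefix (capped by both lengths)
--     i = 0
--     while i < n and i < len(path_segments) and base_segments[i] == path_segments[i]:
--         i += 1
--     if i == n:
--         # every base segment matched
--         if len(path_segments) > n:
--             return path_segments[n - 1:]
--         return []
--     if i >= len(path_segments):
--         # path exhausted before base diverged
--         return []
--     result = ['..'] * (n - 1 - i) + path_segments[i:]
--     if result == ['']:
--         return ['.'] + result
--     return result
-- ===== Notes on version B (the rewrite author's own statement) =====
-- stated objective: faster
-- what changed: Replaced the per-base-segment loop that repeatedly rebuilds the result list (['..'] + result each step, path[pos:] re-sliced) with a single scan for the first divergence index followed by building ['..']*(n-1-i) + path[i:] once.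
import Mathlib
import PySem

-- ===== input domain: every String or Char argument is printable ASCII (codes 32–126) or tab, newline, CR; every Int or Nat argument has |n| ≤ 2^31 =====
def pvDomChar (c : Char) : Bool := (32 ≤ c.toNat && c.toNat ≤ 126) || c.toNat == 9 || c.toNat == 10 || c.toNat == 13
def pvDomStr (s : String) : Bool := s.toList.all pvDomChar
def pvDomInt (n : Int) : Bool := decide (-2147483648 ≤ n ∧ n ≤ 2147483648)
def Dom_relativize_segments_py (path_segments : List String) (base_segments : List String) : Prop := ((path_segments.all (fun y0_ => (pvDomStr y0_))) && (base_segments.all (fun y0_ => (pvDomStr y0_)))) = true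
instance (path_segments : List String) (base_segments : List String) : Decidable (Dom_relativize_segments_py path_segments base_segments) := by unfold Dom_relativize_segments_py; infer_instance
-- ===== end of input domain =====

-- B replaces A's quadratic loop (which rebuilds the result list every iteration) by a
-- single scan to the first divergence index followed by building the result once (faster).


-- ===== PORT A =====
-- one iteration of A's while loop body (pos < len(base_segments) always holds at the call,
-- and path_segments[pos] is only read when pos < len(path_segments), so getD is exact)
def pvStepA (path_segments base_segments : List String) (result : List String) (pos : Nat) : List String :=
  if result ≠ [] then [".."] ++ result
  else if path_segments.length ≤ pos ∨ base_segments.getD pos "" ≠ path_segments.getD pos ""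
       then result ++ PySem.List.slice path_segments (some (pos : Int)) none
       else result

def relativize_segments_py (path_segments : List String) (base_segments : List String) : List String :=
  let result := (List.range base_segments.length).foldl (pvStepA path_segments base_segments) []
  if result = [] ∧ base_segments.length < path_segments.length then
    PySem.List.slice path_segments (some ((base_segments.length : Int) - 1)) none
  else if result = [""] then ["."] ++ result
  else result

-- ===== PORT B =====
-- B's scan 'while i < n and i < len(path) and base[i] == path[i]: i += 1' as structural
-- recursion over the two lists: returns the common-prefix length
def pvCpl (base_segments path_segments : List String) : Nat :=
  match base_segments, path_segments with
  | b :: bs, p :: ps => if b = p then pvCpl bs ps + 1 else 0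
  | _, _ => 0

def relativize_segments_py_alt (path_segments : List String) (base_segments : List String) : List String :=
  let n := base_segments.length
  let i := pvCpl base_segments path_segments
  if i = n then
    if n < path_segments.length then
      PySem.List.slice path_segments (some ((n : Int) - 1)) none
    else []
  else if path_segments.length ≤ i then []
  else
    -- path_segments[i:] with i ≥ 0 is exactly List.drop i
    let result := List.replicate (n - 1 - i) ".." ++ path_segments.drop i
    if result = [""] then ["."] ++ result else result

-- ===== PRECONDITION & SPEC =====
def Spec_relativize_segments_py (path_segments : List String) (base_segments : List String) (out : List String) : Prop := out = relativize_segments_py_alt path_segments base_segments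
instance (path_segments : List String) (base_segments : List String) (out : List String) : Decidable (Spec_relativize_segments_py path_segments base_segments out) := by unfold Spec_relativize_segments_py; infer_instance

-- ===== CLAIM (what is proved, stated in full; the proofs are below) =====
def Claim_equal_relativize_segments_py : Prop := ∀ (path_segments : List String) (base_segments : List String), Dom_relativize_segments_py path_segments base_segments → Spec_relativize_segments_py path_segments base_segments (relativize_segments_py path_segments base_segments)

-- ===== LEMMAS AND PROOFS =====

theorem pvCpl_le_left (b p : List String) : pvCpl b p ≤ b.length := by
  induction b generalizing p with
  | nil => simp [pvCpl]
  | cons x xs ih =>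
    cases p with
    | nil => simp [pvCpl]
    | cons y ys =>
      simp only [pvCpl]
      split <;> simp [Nat.succ_le_succ (ih ys)]

theorem pvCpl_le_right (b p : List String) : pvCpl b p ≤ p.length := by
  induction b generalizing p with
  | nil => simp [pvCpl]
  | cons x xs ih =>
    cases p with
    | nil => simp [pvCpl]
    | cons y ys =>
      simp only [pvCpl]
      split <;> simp [Nat.succ_le_succ (ih ys)]

theorem pvCpl_getD_eq (b p : List String) (j : Nat) (hj : j < pvCpl b p) :
    b.getD j "" = p.getD j "" := by
  induction b generalizing p j with
  | nil => simp [pvCpl] at hj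
  | cons x xs ih =>
    cases p with
    | nil => simp [pvCpl] at hj
    | cons y ys =>
      simp only [pvCpl] at hj
      by_cases hxy : x = y
      · simp only [if_pos hxy] at hj
        cases j with
        | zero => simpa using hxy
        | succ j' => simpa using ih ys j' (by omega)
      · simp [if_neg hxy] at hj

theorem pvCpl_ne (b p : List String) (hb : pvCpl b p < b.length) (hp : pvCpl b p < p.length) :
    b.getD (pvCpl b p) "" ≠ p.getD (pvCpl b p) "" := by
  induction b generalizing p with
  | nil => simp at hb
  | cons x xs ih =>
    cases p with
    | nil => simp at hp
    | cons y ys =>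
      by_cases hxy : x = y
      · simp only [pvCpl, if_pos hxy] at hb hp ⊢
        simpa using ih ys (by simpa using hb) (by simpa using hp)
      · simpa [pvCpl, if_neg hxy] using hxy

-- the fold stays [] while the segments agree
theorem pvFold_prefix (path base : List String) (m : Nat)
    (h : ∀ j, j < m → j < path.length ∧ base.getD j "" = path.getD j "") :
    (List.range m).foldl (pvStepA path base) [] = [] := by
  induction m with
  | zero => simp
  | succ m ih =>
    rw [List.range_succ, List.foldl_append]
    rw [ih (fun j hj => h j (by omega))]
    obtain ⟨h1, h2⟩ := h m (by omega)
    show pvStepA path base [] m = []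
    unfold pvStepA
    rw [if_neg (by simp), if_neg (by rw [not_or, not_not]; exact ⟨by omega, h2⟩)]

-- the fold stays [] when every index is past the end of path
theorem pvFold_past (path base : List String) (l : List Nat)
    (h : ∀ j ∈ l, path.length ≤ j) :
    l.foldl (pvStepA path base) [] = [] := by
  induction l with
  | nil => rfl
  | cons j l ih =>
    have hj : path.length ≤ j := h j (by simp)
    have hstep : pvStepA path base [] j = [] := by
      unfold pvStepA
      rw [if_neg (by simp), if_pos (Or.inl hj), PySem.List.slice_from_natCast]
      simp [List.drop_eq_nil_of_le hj]
    rw [List.foldl_cons, hstep]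
    exact ih (fun j hj => h j (by simp [hj]))

-- once nonempty, each step prepends '..'
theorem pvFold_dots (path base : List String) (l : List Nat) (s : List String) (hs : s ≠ []) :
    l.foldl (pvStepA path base) s = List.replicate l.length ".." ++ s := by
  induction l generalizing s with
  | nil => simp
  | cons j l ih =>
    have hstep : pvStepA path base s j = [".."] ++ s := by simp [pvStepA, hs]
    rw [List.foldl_cons, hstep, ih ([".."] ++ s) (by simp)]
    simp [List.replicate_succ']

theorem relativize_segments_py_eq (path base : List String) :
    relativize_segments_py path base = relativize_segments_py_alt path base := by
  have hkb : pvCpl base path ≤ base.length := pvCpl_le_left base path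
  have hkp : pvCpl base path ≤ path.length := pvCpl_le_right base path
  by_cases hfull : pvCpl base path = base.length
  · -- full match: the fold is []
    have hfold : (List.range base.length).foldl (pvStepA path base) [] = [] := by
      refine pvFold_prefix path base base.length (fun j hj => ?_)
      exact ⟨by omega, pvCpl_getD_eq base path j (by omega)⟩
    by_cases hlong : base.length < path.length
    · simp [relativize_segments_py, relativize_segments_py_alt, hfold, hfull, hlong]
    · simp [relativize_segments_py, relativize_segments_py_alt, hfold, hfull, hlong]
  · have hkb' : pvCpl base path < base.length := lt_of_le_of_ne hkb hfull
    obtain ⟨m, hm⟩ : ∃ m, base.length = (pvCpl base path + 1) + m :=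
      ⟨base.length - (pvCpl base path + 1), by omega⟩
    have hrange : List.range base.length =
        (List.range (pvCpl base path) ++ [pvCpl base path]) ++
          (List.range m).map ((pvCpl base path + 1) + ·) := by
      rw [hm, List.range_add, List.range_succ]
    have hpre : (List.range (pvCpl base path)).foldl (pvStepA path base) [] = [] :=
      pvFold_prefix path base (pvCpl base path)
        (fun j hj => ⟨by omega, pvCpl_getD_eq base path j hj⟩)
    by_cases hp : path.length ≤ pvCpl base path
    · -- path exhausted at the divergence point: everything stays []
      have hstep : pvStepA path base [] (pvCpl base path) = [] := by
        unfold pvStepA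
        rw [if_neg (by simp), if_pos (Or.inl hp), PySem.List.slice_from_natCast]
        simp [List.drop_eq_nil_of_le hp]
      have hfold : (List.range base.length).foldl (pvStepA path base) [] = [] := by
        rw [hrange, List.foldl_append, List.foldl_append, hpre, List.foldl_cons, hstep,
          List.foldl_nil]
        exact pvFold_past path base _ (by
          intro j hj
          simp only [List.mem_map] at hj
          obtain ⟨j', _, rfl⟩ := hj
          omega)
      have hnl : ¬ base.length < path.length := by omega
      simp [relativize_segments_py, relativize_segments_py_alt, hfold, hfull, hp, hnl]
    · -- genuine mismatch at pvCpl base path < min of both lengths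
      rw [not_le] at hp
      have hne := pvCpl_ne base path hkb' hp
      have hdrop : path.drop (pvCpl base path) ≠ [] := by
        intro h
        have := List.drop_eq_nil_iff.mp h
        omega
      have hstep : pvStepA path base [] (pvCpl base path) = path.drop (pvCpl base path) := by
        unfold pvStepA
        rw [if_neg (by simp), if_pos (Or.inr hne), PySem.List.slice_from_natCast]
        simp
      have hfold : (List.range base.length).foldl (pvStepA path base) [] =
          List.replicate m ".." ++ path.drop (pvCpl base path) := by
        rw [hrange, List.foldl_append, List.foldl_append, hpre, List.foldl_cons, hstep,
          List.foldl_nil, pvFold_dots path base _ _ hdrop]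
        simp
      have hm' : base.length - 1 - pvCpl base path = m := by omega
      have hnonempty : List.replicate m ".." ++ path.drop (pvCpl base path) ≠ [] := by
        simp [hdrop]
      simp only [relativize_segments_py, relativize_segments_py_alt, hfold, hm',
        if_neg hfull, if_neg (not_le.mpr hp)]
      rw [if_neg (fun h => hnonempty h.1)]

-- ===== VERDICT (by name: the statement is the Claim_ definition above) =====
theorem relativize_segments_py_spec : Claim_equal_relativize_segments_py := by
  intro path base _
  unfold Spec_relativize_segments_py
  exact relativize_segments_py_eq path base
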